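-- pv_equiv track=rewrite | github.com/YudhaJeo/Desktop-Python-AudioGain | mic_booster_pro.py | find_vbcable
-- ===== SOURCE A (Python) =====
-- def find_vbcable(outputs):
--     priorities = [
--         "cable in 16ch",
--         "cable in",
--         "cable",
--         "virtual audio cable",
--         "vb-audio",
--     ]
--     for pat in priorities:
--         for name in outputs:
--             if pat in name.lower():
--                 return name
--     return None
-- ===== SOURCE B (Python) =====
-- def find_vbcable(outputs):
--     priorities = [
--         "cable in 16ch",
--         "cable in",
--         "cable",
--         "virtual audio cable",
--         "vb-audio",
--     ]
--     sentinel = len(priorities)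
--     best_rank = sentinel
--     best_name = None
--     for name in outputs:
--         low = name.lower()
--         rank = sentinel
--         for i, pat in enumerate(priorities):
--             if pat in low:
--                 rank = i
--                 break
--         if rank < best_rank:
--             best_rank = rank
--             best_name = name
--     return best_name
-- ===== Notes on version B (the rewrite author's own statement) =====
-- stated objective: alternative
-- what changed: Replaces the pattern-major nested loop (one full scan of outputs per priority pattern) with a single pass over outputs that computes each name's best-priority rank (breaking at the first matching pattern) and keeps the first name with a strictly smaller rank.
import Mathlib
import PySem

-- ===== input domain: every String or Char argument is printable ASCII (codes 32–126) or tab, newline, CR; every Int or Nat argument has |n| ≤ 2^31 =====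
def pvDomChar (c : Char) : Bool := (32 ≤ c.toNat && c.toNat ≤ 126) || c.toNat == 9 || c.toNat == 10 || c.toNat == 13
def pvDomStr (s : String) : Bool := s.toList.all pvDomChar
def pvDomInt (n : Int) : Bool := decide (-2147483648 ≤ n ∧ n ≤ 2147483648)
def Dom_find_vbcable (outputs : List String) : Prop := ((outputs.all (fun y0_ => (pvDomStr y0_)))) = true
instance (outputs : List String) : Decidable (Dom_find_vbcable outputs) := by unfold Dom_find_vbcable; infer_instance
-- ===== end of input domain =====

-- B replaces A's pattern-major nested loops with a single pass over outputs keeping the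
-- best-ranked name (strictly-smaller-rank update preserves A's tie-breaking); objective: alternative decomposition.

-- ===== PORT A =====
-- the module-level priority list of A (identical in B)
def pvPriorities : List String :=
  ["cable in 16ch", "cable in", "cable", "virtual audio cable", "vb-audio"]

-- inner loop of A: first name whose lowercase contains pat, else none
def pvFindName (pat : String) : List String → Option String
  | [] => none
  | n :: rest => if PySem.Str.isIn pat (PySem.Str.lower n) then some n else pvFindName pat rest

-- outer loop of A over the priority patterns
def pvOuter (outputs : List String) : List String → Option String
  | [] => none
  | p :: ps =>
    match pvFindName p outputs with
    | some n => some n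
    | none => pvOuter outputs ps

def find_vbcable (outputs : List String) : Option String :=
  pvOuter outputs pvPriorities

-- ===== PORT B =====
-- inner loop of B: index of the first pattern contained in low, else the list's length (sentinel)
def pvRank (low : String) : List String → Nat
  | [] => 0
  | p :: ps => if PySem.Str.isIn p low then 0 else pvRank low ps + 1

def find_vbcable_alt (outputs : List String) : Option String :=
  (outputs.foldl
    (fun st name =>
      let r := pvRank (PySem.Str.lower name) pvPriorities
      if r < st.1 then (r, some name) else st)
    (pvPriorities.length, (none : Option String))).2

-- ===== PRECONDITION & SPEC =====
def Spec_find_vbcable (outputs : List String) (out : Option String) : Prop := out = find_vbcable_alt outputs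
instance (outputs : List String) (out : Option String) : Decidable (Spec_find_vbcable outputs out) := by unfold Spec_find_vbcable; infer_instance

-- ===== CLAIM (what is proved, stated in full; the proofs are below) =====
def Claim_equal_find_vbcable : Prop := ∀ (outputs : List String), Dom_find_vbcable outputs → Spec_find_vbcable outputs (find_vbcable outputs)

-- ===== LEMMAS AND PROOFS =====

-- minimum rank over a list of names (sentinel = ps.length for the empty list)
def pvMinR (ps : List String) : List String → Nat
  | [] => ps.length
  | x :: xs => min (pvRank (PySem.Str.lower x) ps) (pvMinR ps xs)

-- outputs-major recursion equivalent to both programs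
def pvBr (ps : List String) : List String → Option String
  | [] => none
  | x :: xs =>
    if pvRank (PySem.Str.lower x) ps ≤ pvMinR ps xs ∧ pvRank (PySem.Str.lower x) ps < ps.length
    then some x else pvBr ps xs

theorem pvRank_le (low : String) (ps : List String) : pvRank low ps ≤ ps.length := by
  induction ps with
  | nil => simp [pvRank]
  | cons p ps ih => simp only [pvRank, List.length_cons]; split <;> omega

theorem pvMinR_le (ps xs : List String) : pvMinR ps xs ≤ ps.length := by
  induction xs with
  | nil => simp [pvMinR]
  | cons x xs ih => simp only [pvMinR]; omega

-- if no name matches p, ranks over (p :: ps) are the ranks over ps shifted by one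
theorem pvRank_shift (p : String) (ps : List String) (x : String)
    (h : PySem.Str.isIn p (PySem.Str.lower x) = false) :
    pvRank (PySem.Str.lower x) (p :: ps) = pvRank (PySem.Str.lower x) ps + 1 := by
  simp only [pvRank]
  rw [if_neg (by rw [h]; exact Bool.false_ne_true)]

theorem pvMinR_shift (p : String) (ps xs : List String)
    (h : pvFindName p xs = none) :
    pvMinR (p :: ps) xs = pvMinR ps xs + 1 := by
  induction xs with
  | nil => simp [pvMinR]
  | cons x xs ih =>
    simp only [pvFindName] at h
    cases hx : PySem.Str.isIn p (PySem.Str.lower x) with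
    | true => rw [if_pos hx] at h; exact absurd h (by simp)
    | false =>
      rw [if_neg (by rw [hx]; exact Bool.false_ne_true)] at h
      simp only [pvMinR, pvRank_shift p ps x hx, ih h]
      omega

-- if some name matches p, the minimum rank over (p :: ps) is 0
theorem pvMinR_zero (p : String) (ps xs : List String) (y : String)
    (h : pvFindName p xs = some y) :
    pvMinR (p :: ps) xs = 0 := by
  induction xs with
  | nil => exact absurd h (by simp [pvFindName])
  | cons x xs ih =>
    simp only [pvFindName] at h
    cases hx : PySem.Str.isIn p (PySem.Str.lower x) with
    | true =>
      simp only [pvMinR, pvRank]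
      rw [if_pos hx]
      omega
    | false =>
      rw [if_neg (by rw [hx]; exact Bool.false_ne_true)] at h
      simp only [pvMinR, ih h]
      omega

-- A on an outputs-cons step, generalized over the priority list
theorem pvOuter_cons_char (ps : List String) (x : String) (xs : List String) :
    pvOuter (x :: xs) ps =
      (if pvRank (PySem.Str.lower x) ps ≤ pvMinR ps xs ∧ pvRank (PySem.Str.lower x) ps < ps.length
       then some x else pvOuter xs ps) := by
  induction ps with
  | nil => simp [pvOuter]
  | cons p ps ih =>
    cases hx : PySem.Str.isIn p (PySem.Str.lower x) with
    | true =>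
      have hr : pvRank (PySem.Str.lower x) (p :: ps) = 0 := by
        simp only [pvRank]; rw [if_pos hx]
      simp only [pvOuter, pvFindName]
      rw [if_pos hx, hr, if_pos ⟨Nat.zero_le _, by simp⟩]
    | false =>
      have hne : ¬ (PySem.Str.isIn p (PySem.Str.lower x) = true) := by
        rw [hx]; exact Bool.false_ne_true
      have hrank := pvRank_shift p ps x hx
      cases hfind : pvFindName p xs with
      | some y =>
        have hmin := pvMinR_zero p ps xs y hfind
        simp only [pvOuter, pvFindName]
        rw [if_neg hne, hfind, hmin, hrank,
          if_neg (by intro hc; omega)]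
      | none =>
        have hmin := pvMinR_shift p ps xs hfind
        simp only [pvOuter, pvFindName]
        rw [if_neg hne, hfind, hmin, hrank, ih]
        simp only [List.length_cons]
        by_cases hc : pvRank (PySem.Str.lower x) ps ≤ pvMinR ps xs ∧ pvRank (PySem.Str.lower x) ps < ps.length
        · rw [if_pos hc, if_pos (by omega)]
        · rw [if_neg hc, if_neg (by intro hcc; exact hc ⟨by omega, by omega⟩)]

theorem pvOuter_nil (ps : List String) : pvOuter [] ps = none := by
  induction ps with
  | nil => rfl
  | cons p ps ih => simp [pvOuter, pvFindName, ih]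

theorem pvOuter_eq_pvBr (ps xs : List String) : pvOuter xs ps = pvBr ps xs := by
  induction xs with
  | nil => simp [pvOuter_nil, pvBr]
  | cons x xs ih => rw [pvOuter_cons_char, pvBr, ih]

-- characterisation of B's fold from any state (r, bn) with r ≤ ps.length
theorem pvFold_char (ps : List String) (xs : List String) :
    ∀ (r : Nat) (bn : Option String), r ≤ ps.length →
    (xs.foldl
      (fun st name =>
        let rk := pvRank (PySem.Str.lower name) ps
        if rk < st.1 then (rk, some name) else st)
      (r, bn)) =
    (if pvMinR ps xs < r then (pvMinR ps xs, pvBr ps xs) else (r, bn)) := by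
  induction xs with
  | nil =>
    intro r bn hr
    simp only [List.foldl_nil, pvMinR]
    rw [if_neg (by omega)]
  | cons x xs ih =>
    intro r bn hr
    simp only [List.foldl_cons]
    by_cases hx : pvRank (PySem.Str.lower x) ps < r
    · rw [if_pos hx, ih _ _ (le_of_lt (lt_of_lt_of_le hx hr))]
      by_cases hm : pvMinR ps xs < pvRank (PySem.Str.lower x) ps
      · rw [if_pos hm]
        simp only [pvMinR, pvBr]
        rw [if_pos (by omega), if_neg (by intro hc; omega)]
        exact Prod.ext (by omega) rfl
      · rw [if_neg hm]
        simp only [pvMinR, pvBr]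
        rw [if_pos (by omega), if_pos ⟨by omega, by omega⟩]
        exact Prod.ext (by omega) rfl
    · rw [if_neg hx, ih _ _ hr]
      by_cases hm : pvMinR ps xs < r
      · rw [if_pos hm]
        simp only [pvMinR, pvBr]
        rw [if_pos (by omega), if_neg (by intro hc; omega)]
        exact Prod.ext (by omega) rfl
      · rw [if_neg hm]
        simp only [pvMinR]
        rw [if_neg (by omega)]

theorem pvBr_none_of_min_eq (ps xs : List String) (h : pvMinR ps xs = ps.length) :
    pvBr ps xs = none := by
  induction xs with
  | nil => rfl
  | cons x xs ih =>
    simp only [pvMinR] at h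
    have h1 := pvRank_le (PySem.Str.lower x) ps
    have h2 := pvMinR_le ps xs
    simp only [pvBr]
    rw [if_neg (by intro hc; omega)]
    exact ih (by omega)

-- ===== VERDICT (by name: the statement is the Claim_ definition above) =====
theorem find_vbcable_spec : Claim_equal_find_vbcable := by
  intro outputs _
  show find_vbcable outputs = find_vbcable_alt outputs
  unfold find_vbcable find_vbcable_alt
  rw [pvFold_char pvPriorities outputs pvPriorities.length none (le_refl _)]
  rw [pvOuter_eq_pvBr]
  by_cases hm : pvMinR pvPriorities outputs < pvPriorities.length
  · rw [if_pos hm]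
  · rw [if_neg hm]
    have := pvMinR_le pvPriorities outputs
    exact pvBr_none_of_min_eq _ _ (by omega)
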